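-- pv_equiv track=rewrite | github.com/paiml/depyler | examples/hard_graph_patterns.py | sum_degrees
-- ===== SOURCE A (Python) =====
-- def all_nodes(graph: dict[int, list[int]]) -> list[int]:
--     """Extract all unique nodes from a graph adjacency list."""
--     node_set: dict[int, int] = {}
--     for node in graph:
--         node_set[node] = 1
--         neighbors: list[int] = graph[node]
--         j: int = 0
--         while j < len(neighbors):
--             node_set[neighbors[j]] = 1
--             j = j + 1
--     result: list[int] = []
--     for n in node_set:
--         result.append(n)
--     return result
--
-- def make_undirected(graph: dict[int, list[int]]) -> dict[int, list[int]]: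
--     """Ensure graph has edges in both directions without duplicates."""
--     ug: dict[int, list[int]] = {}
--     edge_set: dict[int, dict[int, int]] = {}
--     for node in graph:
--         if node not in ug:
--             ug[node] = []
--         if node not in edge_set:
--             edge_set[node] = {}
--         neighbors: list[int] = graph[node]
--         k: int = 0
--         while k < len(neighbors):
--             nb: int = neighbors[k]
--             if nb not in ug:
--                 ug[nb] = []
--             if nb not in edge_set:
--                 edge_set[nb] = {}
--             if nb not in edge_set[node]:
--                 edge_set[node][nb] = 1
--                 ug[node].append(nb)
--             if node not in edge_set[nb]:
--                 edge_set[nb][node] = 1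
--                 ug[nb].append(node)
--             k = k + 1
--     return ug
--
-- def degree_sequence(graph: dict[int, list[int]]) -> list[int]:
--     """Return sorted (descending) degree sequence of an undirected graph."""
--     ug: dict[int, list[int]] = make_undirected(graph)
--     nodes: list[int] = all_nodes(ug)
--     degrees: list[int] = []
--     ni: int = 0
--     while ni < len(nodes):
--         node: int = nodes[ni]
--         deg: int = 0
--         if node in ug:
--             deg = len(ug[node])
--         degrees.append(deg)
--         ni = ni + 1
--     si: int = 0
--     while si < len(degrees):
--         sj: int = si + 1
--         while sj < len(degrees):
--             if degrees[sj] > degrees[si]: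
--                 tmp: int = degrees[si]
--                 degrees[si] = degrees[sj]
--                 degrees[sj] = tmp
--             sj = sj + 1
--         si = si + 1
--     return degrees
--
-- def sum_degrees(graph: dict[int, list[int]]) -> int:
--     """Sum of all degrees (should be 2 * num_edges for undirected)."""
--     seq: list[int] = degree_sequence(graph)
--     total: int = 0
--     i: int = 0
--     while i < len(seq):
--         total = total + seq[i]
--         i = i + 1
--     return total
-- ===== SOURCE B (Python) =====
-- def _norm(u, v):
--     return (u, v) if u <= v else (v, u)
--
-- def sum_degrees(graph: dict[int, list[int]]) -> int:
--     """Sum of all degrees (should be 2 * num_edges for undirected)."""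
--     edges = set()
--     for u, nbrs in graph.items():
--         for v in nbrs:
--             edges.add(_norm(u, v))
--     total = 0
--     for e in edges:
--         total += 1 if e[0] == e[1] else 2
--     return total
-- ===== Notes on version B (the rewrite author's own statement) =====
-- stated objective: faster
-- what changed: Instead of materialising the undirected adjacency dict, extracting all nodes, building and selection-sorting the degree sequence and summing it, B collects each edge once as a normalised (min,max) pair in a set and returns sum of 2 per proper edge and 1 per self-loop.
import Mathlib
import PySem

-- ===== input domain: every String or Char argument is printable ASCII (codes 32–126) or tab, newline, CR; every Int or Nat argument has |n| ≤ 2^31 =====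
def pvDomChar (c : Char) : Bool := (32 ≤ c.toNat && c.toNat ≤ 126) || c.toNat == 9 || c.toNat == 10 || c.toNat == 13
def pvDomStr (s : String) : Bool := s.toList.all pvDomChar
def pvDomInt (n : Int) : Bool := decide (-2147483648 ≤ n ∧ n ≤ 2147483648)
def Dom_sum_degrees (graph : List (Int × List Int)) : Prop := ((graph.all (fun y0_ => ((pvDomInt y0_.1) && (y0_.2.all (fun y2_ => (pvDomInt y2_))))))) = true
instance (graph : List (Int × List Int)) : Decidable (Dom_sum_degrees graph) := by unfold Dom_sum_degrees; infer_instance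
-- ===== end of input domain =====

-- B replaces A's build-undirected-dict / collect-nodes / selection-sort-and-sum pipeline by
-- counting each distinct normalised edge once (2 per proper edge, 1 per self-loop); faster.

-- ===== PORT A =====
-- make_undirected: the two "if _ not in ug / edge_set" guards at the head of the outer loop
-- and of each inner iteration share this shape.
def pvEnsure (st : PySem.Dict Int (List Int) × PySem.Dict Int (PySem.Dict Int Int)) (node : Int) :
    PySem.Dict Int (List Int) × PySem.Dict Int (PySem.Dict Int Int) :=
  let ug := if st.1.contains node then st.1 else st.1.insert node []
  let es := if st.2.contains node then st.2 else st.2.insert node PySem.Dict.empty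
  (ug, es)

-- body of make_undirected's inner while-loop, one neighbor nb of node
def pvNeighborStep (node : Int) (st : PySem.Dict Int (List Int) × PySem.Dict Int (PySem.Dict Int Int))
    (nb : Int) : PySem.Dict Int (List Int) × PySem.Dict Int (PySem.Dict Int Int) :=
  let st := pvEnsure st nb
  let st :=
    if (st.2.getD node PySem.Dict.empty).contains nb then st
    else (st.1.modify node [] (fun l => l ++ [nb]), st.2.modify node PySem.Dict.empty (fun m => m.insert nb 1))
  if (st.2.getD nb PySem.Dict.empty).contains node then st
  else (st.1.modify nb [] (fun l => l ++ [node]), st.2.modify nb PySem.Dict.empty (fun m => m.insert node 1))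

def pvMakeUndirected (graph : List (Int × List Int)) : PySem.Dict Int (List Int) :=
  let gd := PySem.Dict.ofList graph
  (gd.keys.foldl
      (fun st node => (gd.getD node []).foldl (pvNeighborStep node) (pvEnsure st node))
      (PySem.Dict.empty, PySem.Dict.empty)).1

def pvAllNodes (g : PySem.Dict Int (List Int)) : List Int :=
  (g.keys.foldl
      (fun d node => (g.getD node []).foldl (fun d nb => d.insert nb 1) (d.insert node 1))
      (PySem.Dict.empty : PySem.Dict Int Int)).keys

-- degree_sequence's inner while-loop (conditional swap of degrees[si] / degrees[sj]);
-- the fuel argument only bounds the iteration count (the loop runs at most ds.length steps)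
def pvSwapInner (fuel : Nat) (ds : List Int) (si sj : Nat) : List Int :=
  match fuel with
  | 0 => ds
  | fuel + 1 =>
    if sj < ds.length then
      pvSwapInner fuel
        (if ds.getD sj 0 > ds.getD si 0 then (ds.set si (ds.getD sj 0)).set sj (ds.getD si 0) else ds)
        si (sj + 1)
    else ds

-- degree_sequence's outer while-loop
def pvSwapOuter (fuel : Nat) (ds : List Int) (si : Nat) : List Int :=
  match fuel with
  | 0 => ds
  | fuel + 1 =>
    if si < ds.length then pvSwapOuter fuel (pvSwapInner ds.length ds si (si + 1)) (si + 1) else ds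

def pvDegreeSequence (graph : List (Int × List Int)) : List Int :=
  let ug := pvMakeUndirected graph
  let nodes := pvAllNodes ug
  let degrees := nodes.foldl
    (fun ds node => ds ++ [if ug.contains node then ((ug.getD node []).length : Int) else 0]) []
  pvSwapOuter degrees.length degrees 0

def sum_degrees (graph : List (Int × List Int)) : Int :=
  (pvDegreeSequence graph).foldl (fun total d => total + d) 0

-- ===== PORT B =====
def pvNorm (u v : Int) : Int × Int := if u ≤ v then (u, v) else (v, u)

def sum_degrees_alt (graph : List (Int × List Int)) : Int :=
  let gd := PySem.Dict.ofList graph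
  let edges : PySem.Set (Int × Int) :=
    gd.items.foldl (fun s p => p.2.foldl (fun s v => PySem.Set.add s (pvNorm p.1 v)) s) PySem.Set.empty
  edges.foldl (fun total e => total + (if e.1 == e.2 then 1 else 2)) 0

-- ===== PRECONDITION & SPEC =====
def Spec_sum_degrees (graph : List (Int × List Int)) (out : Int) : Prop := out = sum_degrees_alt graph
instance (graph : List (Int × List Int)) (out : Int) : Decidable (Spec_sum_degrees graph out) := by unfold Spec_sum_degrees; infer_instance

-- ===== CLAIM (what is proved, stated in full; the proofs are below) =====
def Claim_equal_sum_degrees : Prop := ∀ (graph : List (Int × List Int)), Dom_sum_degrees graph → Spec_sum_degrees graph (sum_degrees graph)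

-- ===== LEMMAS AND PROOFS =====

-- total length of all adjacency lists of g (over its keys)
def pvTotal (g : PySem.Dict Int (List Int)) : Int :=
  (g.keys.map (fun k => ((g.getD k []).length : Int))).sum

-- B's weighting of a list of normalised edges
def pvW (S : List (Int × Int)) : Int :=
  (S.map (fun e => if e.1 == e.2 then (1 : Int) else 2)).sum

-- loop invariant tying A's (ug, edge_set) state to B's set S of normalised edges
def pvInv (ug : PySem.Dict Int (List Int)) (es : PySem.Dict Int (PySem.Dict Int Int))
    (S : List (Int × Int)) : Prop :=
  (∀ u v : Int, ((es.getD u PySem.Dict.empty).contains v = true) ↔ pvNorm u v ∈ S)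
  ∧ pvTotal ug = pvW S
  ∧ (∀ u v : Int, v ∈ ug.getD u [] → v ∈ ug.keys)
  ∧ ug.keys.Nodup

theorem pvNorm_comm (u v : Int) : pvNorm u v = pvNorm v u := by
  unfold pvNorm; split_ifs <;> simp_all [Prod.ext_iff] <;> omega

theorem pvNorm_eq_iff (u v a b : Int) :
    pvNorm u v = pvNorm a b ↔ (u = a ∧ v = b) ∨ (u = b ∧ v = a) := by
  unfold pvNorm; split_ifs <;> simp_all [Prod.ext_iff] <;> omega

theorem pvSum_map_update (l : List Int) (hn : l.Nodup) (x : Int) (hx : x ∈ l)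
    (f g : Int → Int) (c : Int) (hfg : ∀ y ∈ l, y ≠ x → f y = g y) (hx2 : f x = g x + c) :
    (l.map f).sum = (l.map g).sum + c := by
  induction l with
  | nil => cases hx
  | cons a l ih =>
    simp only [List.map_cons, List.sum_cons]
    rcases List.mem_cons.mp hx with rfl | hxl
    · have hnl : x ∉ l := (List.nodup_cons.mp hn).1
      have hmap : l.map f = l.map g :=
        List.map_congr_left (fun y hy => hfg y (List.mem_cons_of_mem _ hy) (fun hyx => hnl (hyx ▸ hy)))
      rw [hmap, hx2]; ring
    · have hax : a ≠ x := by rintro rfl; exact (List.nodup_cons.mp hn).1 hxl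
      rw [hfg a (List.mem_cons_self ..) hax,
        ih (List.nodup_cons.mp hn).2 hxl (fun y hy hne => hfg y (List.mem_cons_of_mem _ hy) hne)]
      ring

theorem pvSum_set (l : List Int) (i : Nat) (a : Int) (h : i < l.length) :
    (l.set i a).sum = l.sum - l.getD i 0 + a := by
  induction l generalizing i with
  | nil => simp at h
  | cons x l ih =>
    cases i with
    | zero => simp [List.getD]; ring
    | succ n =>
      simp only [List.set_cons_succ, List.sum_cons, List.getD_cons_succ]
      rw [ih n (by simpa using h)]; ring

theorem pvSwap_sum (l : List Int) (i j : Nat) (hi : i < l.length) (hj : j < l.length) (hne : i ≠ j) :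
    ((l.set i (l.getD j 0)).set j (l.getD i 0)).sum = l.sum := by
  have hgd : (l.set i (l.getD j 0)).getD j 0 = l.getD j 0 := by
    rw [List.getD_eq_getElem?_getD, List.getElem?_set_ne hne, ← List.getD_eq_getElem?_getD]
  rw [pvSum_set _ j _ (by simpa using hj), pvSum_set _ i _ hi, hgd]
  ring

theorem pvCondInsert_getD {ν : Type} (d : PySem.Dict Int ν) (k u : Int) (v0 : ν) :
    (if d.contains k then d else d.insert k v0).getD u v0 = d.getD u v0 := by
  split
  · rfl
  · rename_i hc
    rw [PySem.Dict.getD_insert]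
    split
    · rename_i hu; subst hu
      exact (PySem.Dict.getD_of_not_contains d v0 (Bool.not_eq_true _ ▸ hc)).symm
    · rfl

theorem pvCondInsert_mem_keys {ν : Type} (d : PySem.Dict Int ν) (k u : Int) (v0 : ν) :
    u ∈ (if d.contains k then d else d.insert k v0).keys ↔ u ∈ d.keys ∨ u = k := by
  split
  · rename_i hc
    exact ⟨Or.inl, fun h' => h'.elim id (fun e => e ▸ (PySem.Dict.contains_iff_mem_keys d k).mp hc)⟩
  · rw [PySem.Dict.mem_keys_insert]; exact or_comm

theorem pvCondInsert_nodup {ν : Type} (d : PySem.Dict Int ν) (k : Int) (v0 : ν)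
    (h : d.keys.Nodup) : (if d.contains k then d else d.insert k v0).keys.Nodup := by
  split
  · exact h
  · exact PySem.Dict.nodup_keys_insert d k v0 h

theorem pvCondInsert_total (g : PySem.Dict Int (List Int)) (k : Int) :
    pvTotal (if g.contains k then g else g.insert k []) = pvTotal g := by
  split
  · rfl
  · rename_i hc
    have hc' : g.contains k = false := Bool.not_eq_true _ ▸ hc
    unfold pvTotal
    rw [PySem.Dict.keys_insert_of_not_contains _ _ hc', List.map_append, List.sum_append]
    have hmap : g.keys.map (fun u => (((g.insert k []).getD u []).length : Int))
        = g.keys.map (fun u => ((g.getD u []).length : Int)) := by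
      refine List.map_congr_left (fun u hu => ?_)
      rw [PySem.Dict.getD_insert]
      split
      · rename_i hu'; subst hu'
        exact absurd ((PySem.Dict.contains_iff_mem_keys g u).mpr hu) (by simp [hc'])
      · rfl
    rw [hmap]
    simp [PySem.Dict.getD_insert]

theorem pvEnsure_inv (st : PySem.Dict Int (List Int) × PySem.Dict Int (PySem.Dict Int Int))
    (node : Int) (S : List (Int × Int)) (h : pvInv st.1 st.2 S) :
    pvInv (pvEnsure st node).1 (pvEnsure st node).2 S ∧ node ∈ (pvEnsure st node).1.keys
      ∧ ∀ k ∈ st.1.keys, k ∈ (pvEnsure st node).1.keys := by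
  obtain ⟨h1, h2, h3, h4⟩ := h
  simp only [pvEnsure]
  refine ⟨⟨?_, ?_, ?_, ?_⟩, ?_, ?_⟩
  · intro u v
    rw [pvCondInsert_getD]
    exact h1 u v
  · rw [pvCondInsert_total]
    exact h2
  · intro u v hv
    rw [pvCondInsert_getD] at hv
    rw [pvCondInsert_mem_keys]
    exact Or.inl (h3 u v hv)
  · exact pvCondInsert_nodup _ _ _ h4
  · rw [pvCondInsert_mem_keys]
    exact Or.inr rfl
  · intro k hk
    rw [pvCondInsert_mem_keys]
    exact Or.inl hk

theorem pvStep_inv (node nb : Int) (st : PySem.Dict Int (List Int) × PySem.Dict Int (PySem.Dict Int Int))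
    (S : List (Int × Int)) (h : pvInv st.1 st.2 S) (hnode : node ∈ st.1.keys) :
    pvInv (pvNeighborStep node st nb).1 (pvNeighborStep node st nb).2 (PySem.Set.add S (pvNorm node nb))
      ∧ ∀ k ∈ st.1.keys, k ∈ (pvNeighborStep node st nb).1.keys := by
  obtain ⟨hE, hEnode, hEmono⟩ := pvEnsure_inv st nb S h
  obtain ⟨h1, h2, h3, h4⟩ := hE
  have hnode' : node ∈ (pvEnsure st nb).1.keys := hEmono node hnode
  simp only [pvNeighborStep]
  set t := pvEnsure st nb with ht
  by_cases hc1 : (t.2.getD node PySem.Dict.empty).contains nb = true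
  · -- edge already recorded: both branches skip, the set already contains the edge
    have hm : pvNorm node nb ∈ S := (h1 node nb).mp hc1
    have hc2 : (t.2.getD nb PySem.Dict.empty).contains node = true :=
      (h1 nb node).mpr (by rw [pvNorm_comm]; exact hm)
    rw [if_pos hc1, if_pos hc2, PySem.Set.add_of_mem hm]
    exact ⟨⟨h1, h2, h3, h4⟩, hEmono⟩
  · have hb1 : (t.2.getD node PySem.Dict.empty).contains nb = false := by
      simpa using hc1
    have hm : pvNorm node nb ∉ S := fun hmem => hc1 ((h1 node nb).mpr hmem)
    have hadd : PySem.Set.add S (pvNorm node nb) = S ++ [pvNorm node nb] :=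
      PySem.Set.add_of_not_mem hm
    simp only [hb1, Bool.false_eq_true, if_false]
    set ug2 := t.1.modify node [] (fun l => l ++ [nb]) with hug2
    set es2 := t.2.modify node PySem.Dict.empty (fun m => m.insert nb 1) with hes2
    have hkeys2 : ug2.keys = t.1.keys := by
      rw [hug2, PySem.Dict.keys_modify]
      exact PySem.Dict.keys_insert_of_contains _ _ ((PySem.Dict.contains_iff_mem_keys _ _).mpr hnode')
    have hg2 : ∀ u : Int, ug2.getD u [] = if u = node then t.1.getD node [] ++ [nb] else t.1.getD u [] :=
      fun u => by rw [hug2, PySem.Dict.getD_modify]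
    have he2 : ∀ u : Int, es2.getD u PySem.Dict.empty
        = if u = node then (t.2.getD node PySem.Dict.empty).insert nb 1 else t.2.getD u PySem.Dict.empty :=
      fun u => by rw [hes2, PySem.Dict.getD_modify]
    have htot2 : pvTotal ug2 = pvTotal t.1 + 1 := by
      unfold pvTotal
      rw [hkeys2]
      refine pvSum_map_update t.1.keys h4 node hnode' _ _ 1
        (fun y hy hne => by rw [hg2 y, if_neg hne]) ?_
      rw [hg2 node, if_pos rfl]
      simp
    by_cases hnn : nb = node
    · -- self-loop: only the first direction appends, degree grows by 1
      subst hnn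
      have hc2 : (es2.getD nb PySem.Dict.empty).contains nb = true := by
        rw [he2 nb, if_pos rfl, PySem.Dict.contains_insert]
        simp
      rw [if_pos hc2]
      have hnorm : pvNorm nb nb = (nb, nb) := by unfold pvNorm; simp
      refine ⟨⟨?_, ?_, ?_, ?_⟩, ?_⟩
      · intro u v
        rw [he2 u, hadd, hnorm]
        by_cases hu : u = nb
        · subst hu
          rw [if_pos rfl, PySem.Dict.contains_insert]
          have := h1 u v
          constructor
          · intro hcv
            rcases Bool.or_eq_true .. |>.mp hcv with hvb | hold
            · simp only [beq_iff_eq] at hvb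
              subst hvb
              exact List.mem_append.mpr (Or.inr (by rw [hnorm]; exact List.mem_singleton.mpr rfl))
            · exact List.mem_append.mpr (Or.inl ((h1 u v).mp hold))
          · intro hmem
            rcases List.mem_append.mp hmem with hS | hone
            · exact Bool.or_eq_true .. |>.mpr (Or.inr ((h1 u v).mpr hS))
            · have hv : v = u := by
                have h' : pvNorm u v = pvNorm u u := by rw [hnorm]; exact List.mem_singleton.mp hone
                rcases (pvNorm_eq_iff u v u u).mp h' with ⟨_, hv⟩ | ⟨_, hv⟩ <;> omega
              exact Bool.or_eq_true .. |>.mpr (Or.inl (by simp [hv]))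
        · rw [if_neg hu]
          constructor
          · intro hold
            exact List.mem_append.mpr (Or.inl ((h1 u v).mp hold))
          · intro hmem
            rcases List.mem_append.mp hmem with hS | hone
            · exact (h1 u v).mpr hS
            · exfalso
              have := List.mem_singleton.mp hone
              rcases (pvNorm_eq_iff u v nb nb).mp (by rw [← hnorm] at this; exact this) with ⟨hu', _⟩ | ⟨hu', _⟩ <;> exact hu hu'
      · rw [htot2, h2, hadd]
        unfold pvW
        rw [List.map_append, List.sum_append, hnorm]
        simp
      · intro u v hv
        rw [hg2 u] at hv
        rw [hkeys2]
        by_cases hu : u = nb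
        · rw [if_pos hu] at hv
          rcases List.mem_append.mp hv with hold | hone
          · exact h3 _ _ hold
          · rw [List.mem_singleton.mp hone]
            exact hEnode
        · rw [if_neg hu] at hv
          exact h3 u v hv
      · rw [hkeys2]; exact h4
      · intro k hk
        rw [hkeys2]
        exact hEmono k hk
    · -- proper edge: both directions append, degree sum grows by 2
      have hc2 : (es2.getD nb PySem.Dict.empty).contains node = false := by
        rw [he2 nb, if_neg hnn]
        have : ¬ ((t.2.getD nb PySem.Dict.empty).contains node = true) :=
          fun hh => hm (by rw [pvNorm_comm]; exact (h1 nb node).mp hh)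
        simpa using this
      simp only [hc2, Bool.false_eq_true, if_false]
      set ug3 := ug2.modify nb [] (fun l => l ++ [node]) with hug3
      set es3 := es2.modify nb PySem.Dict.empty (fun m => m.insert node 1) with hes3
      have hnb2 : nb ∈ ug2.keys := hkeys2 ▸ hEnode
      have hkeys3 : ug3.keys = t.1.keys := by
        rw [hug3, PySem.Dict.keys_modify,
          PySem.Dict.keys_insert_of_contains _ _ ((PySem.Dict.contains_iff_mem_keys _ _).mpr hnb2)]
        exact hkeys2
      have hg3 : ∀ u : Int, ug3.getD u [] = if u = nb then ug2.getD nb [] ++ [node] else ug2.getD u [] :=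
        fun u => by rw [hug3, PySem.Dict.getD_modify]
      have he3 : ∀ u : Int, es3.getD u PySem.Dict.empty
          = if u = nb then (es2.getD nb PySem.Dict.empty).insert node 1 else es2.getD u PySem.Dict.empty :=
        fun u => by rw [hes3, PySem.Dict.getD_modify]
      have htot3 : pvTotal ug3 = pvTotal ug2 + 1 := by
        unfold pvTotal
        rw [hkeys3, ← hkeys2]
        refine pvSum_map_update ug2.keys (hkeys2 ▸ h4) nb hnb2 _ _ 1
          (fun y hy hne => by rw [hg3 y, if_neg hne]) ?_
        rw [hg3 nb, if_pos rfl]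
        simp
      have hnorm12 : (pvNorm node nb).1 ≠ (pvNorm node nb).2 := by
        unfold pvNorm; split <;> simp <;> omega
      refine ⟨⟨?_, ?_, ?_, ?_⟩, ?_⟩
      · intro u v
        rw [he3 u, hadd]
        by_cases hu1 : u = nb
        · subst hu1
          rw [if_pos rfl, he2 u, if_neg hnn, PySem.Dict.contains_insert]
          constructor
          · intro hcv
            rcases Bool.or_eq_true .. |>.mp hcv with hvb | hold
            · simp only [beq_iff_eq] at hvb
              subst hvb
              refine List.mem_append.mpr (Or.inr (List.mem_singleton.mpr ?_))
              rw [pvNorm_comm]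
            · exact List.mem_append.mpr (Or.inl ((h1 u v).mp hold))
          · intro hmem
            rcases List.mem_append.mp hmem with hS | hone
            · exact Bool.or_eq_true .. |>.mpr (Or.inr ((h1 u v).mpr hS))
            · have := List.mem_singleton.mp hone
              rcases (pvNorm_eq_iff u v node u).mp this with ⟨hu', _⟩ | ⟨_, hv'⟩
              · exact absurd hu' hnn
              · exact Bool.or_eq_true .. |>.mpr (Or.inl (by simp [hv']))
        · rw [if_neg hu1, he2 u]
          by_cases hu2 : u = node
          · subst hu2
            rw [if_pos rfl, PySem.Dict.contains_insert]
            constructor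
            · intro hcv
              rcases Bool.or_eq_true .. |>.mp hcv with hvb | hold
              · simp only [beq_iff_eq] at hvb
                subst hvb
                exact List.mem_append.mpr (Or.inr (List.mem_singleton.mpr rfl))
              · exact List.mem_append.mpr (Or.inl ((h1 u v).mp hold))
            · intro hmem
              rcases List.mem_append.mp hmem with hS | hone
              · exact Bool.or_eq_true .. |>.mpr (Or.inr ((h1 u v).mpr hS))
              · have := List.mem_singleton.mp hone
                rcases (pvNorm_eq_iff u v u nb).mp this with ⟨_, hv'⟩ | ⟨hu', _⟩
                · exact Bool.or_eq_true .. |>.mpr (Or.inl (by simp [hv']))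
                · exact absurd hu' hu1
          · rw [if_neg hu2]
            constructor
            · intro hold
              exact List.mem_append.mpr (Or.inl ((h1 u v).mp hold))
            · intro hmem
              rcases List.mem_append.mp hmem with hS | hone
              · exact (h1 u v).mpr hS
              · have := List.mem_singleton.mp hone
                rcases (pvNorm_eq_iff u v node nb).mp this with ⟨hu', _⟩ | ⟨hu', _⟩
                · exact absurd hu' hu2
                · exact absurd hu' hu1
      · rw [htot3, htot2, h2, hadd]
        unfold pvW
        rw [List.map_append, List.sum_append]
        simp only [List.map_cons, List.map_nil, List.sum_cons, List.sum_nil]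
        rw [if_neg (by simpa using hnorm12)]
        ring
      · intro u v hv
        rw [hg3 u] at hv
        rw [hkeys3]
        by_cases hu1 : u = nb
        · rw [if_pos hu1] at hv
          rcases List.mem_append.mp hv with hold | hone
          · rw [hg2 nb, if_neg hnn] at hold
            exact h3 nb v hold
          · rw [List.mem_singleton.mp hone]
            exact hnode'
        · rw [if_neg hu1, hg2 u] at hv
          by_cases hu2 : u = node
          · rw [if_pos hu2] at hv
            rcases List.mem_append.mp hv with hold | hone
            · exact h3 node v hold
            · rw [List.mem_singleton.mp hone]
              exact hEnode
          · rw [if_neg hu2] at hv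
            exact h3 u v hv
      · rw [hkeys3]; exact h4
      · intro k hk
        rw [hkeys3]
        exact hEmono k hk

theorem pvInnerFold_inv (node : Int) (ns : List Int)
    (st : PySem.Dict Int (List Int) × PySem.Dict Int (PySem.Dict Int Int))
    (S : List (Int × Int)) (h : pvInv st.1 st.2 S) (hnode : node ∈ st.1.keys) :
    pvInv (ns.foldl (pvNeighborStep node) st).1 (ns.foldl (pvNeighborStep node) st).2
        (ns.foldl (fun s v => PySem.Set.add s (pvNorm node v)) S)
      ∧ ∀ k ∈ st.1.keys, k ∈ (ns.foldl (pvNeighborStep node) st).1.keys := by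
  induction ns generalizing st S with
  | nil => exact ⟨h, fun k hk => hk⟩
  | cons v ns ih =>
    obtain ⟨h1, hmono⟩ := pvStep_inv node v st S h hnode
    obtain ⟨h2, hmono2⟩ := ih _ _ h1 (hmono node hnode)
    exact ⟨h2, fun k hk => hmono2 k (hmono k hk)⟩

theorem pvOuterFold_inv (L : List (Int × List Int))
    (st : PySem.Dict Int (List Int) × PySem.Dict Int (PySem.Dict Int Int))
    (S : List (Int × Int)) (h : pvInv st.1 st.2 S) :
    pvInv (L.foldl (fun st p => p.2.foldl (pvNeighborStep p.1) (pvEnsure st p.1)) st).1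
      (L.foldl (fun st p => p.2.foldl (pvNeighborStep p.1) (pvEnsure st p.1)) st).2
      (L.foldl (fun s p => p.2.foldl (fun s v => PySem.Set.add s (pvNorm p.1 v)) s) S) := by
  induction L generalizing st S with
  | nil => exact h
  | cons p L ih =>
    obtain ⟨h1, hnode, _⟩ := pvEnsure_inv st p.1 S h
    exact ih _ _ (pvInnerFold_inv p.1 p.2 _ S h1 hnode).1

theorem pvAN_mem (g : PySem.Dict Int (List Int)) (l : List Int) (d : PySem.Dict Int Int) (y : Int) :
    y ∈ (l.foldl (fun d node => (g.getD node []).foldl (fun d nb => d.insert nb 1) (d.insert node 1)) d).keys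
      ↔ y ∈ d.keys ∨ ∃ node ∈ l, (y = node ∨ y ∈ g.getD node []) := by
  induction l generalizing d with
  | nil => simp
  | cons n l ih =>
    rw [List.foldl_cons, ih]
    rw [show (fun (d : PySem.Dict Int Int) (nb : Int) => d.insert nb 1)
        = (fun (d : PySem.Dict Int Int) (x : Int) => d.insert x ((fun _ _ => 1) d x)) from rfl] at *
    constructor
    · rintro (hmem | ⟨node, hn, hy⟩)
      · rw [show ((g.getD n []).foldl (fun d x => d.insert x ((fun _ _ => (1:Int)) d x)) (d.insert n 1)).keys
            = PySem.Set.update (d.insert n 1).keys (g.getD n []) from PySem.Dict.keys_foldl_insert _ _ _] at hmem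
        rcases (PySem.Set.mem_update _ _ _).mp hmem with hk | hgd
        · rcases (PySem.Dict.mem_keys_insert _ _ _ _).mp hk with rfl | hk'
          · exact Or.inr ⟨y, List.mem_cons_self .., Or.inl rfl⟩
          · exact Or.inl hk'
        · exact Or.inr ⟨n, List.mem_cons_self .., Or.inr hgd⟩
      · exact Or.inr ⟨node, List.mem_cons_of_mem _ hn, hy⟩
    · have hbase : ∀ z, z ∈ (d.insert n 1).keys ∨ z ∈ g.getD n [] →
          z ∈ ((g.getD n []).foldl (fun d x => d.insert x ((fun _ _ => (1:Int)) d x)) (d.insert n 1)).keys := by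
        intro z hz
        rw [show ((g.getD n []).foldl (fun d x => d.insert x ((fun _ _ => (1:Int)) d x)) (d.insert n 1)).keys
            = PySem.Set.update (d.insert n 1).keys (g.getD n []) from PySem.Dict.keys_foldl_insert _ _ _]
        exact (PySem.Set.mem_update _ _ _).mpr hz
      rintro (hd | ⟨node, hn, hy⟩)
      · exact Or.inl (hbase y (Or.inl ((PySem.Dict.mem_keys_insert _ _ _ _).mpr (Or.inr hd))))
      · rcases List.mem_cons.mp hn with rfl | hn'
        · rcases hy with rfl | hy'
          · exact Or.inl (hbase y (Or.inl ((PySem.Dict.mem_keys_insert _ _ _ _).mpr (Or.inl rfl))))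
          · exact Or.inl (hbase y (Or.inr hy'))
        · exact Or.inr ⟨node, hn', hy⟩

theorem pvAN_nodup (g : PySem.Dict Int (List Int)) (l : List Int) (d : PySem.Dict Int Int)
    (hd : d.keys.Nodup) :
    (l.foldl (fun d node => (g.getD node []).foldl (fun d nb => d.insert nb 1) (d.insert node 1)) d).keys.Nodup := by
  induction l generalizing d with
  | nil => exact hd
  | cons n l ih =>
    rw [List.foldl_cons]
    refine ih _ ?_
    rw [show (fun (d : PySem.Dict Int Int) (nb : Int) => d.insert nb 1)
        = (fun (d : PySem.Dict Int Int) (x : Int) => d.insert x ((fun _ _ => 1) d x)) from rfl,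
      PySem.Dict.keys_foldl_insert]
    exact PySem.Set.nodup_update _ _ (PySem.Dict.nodup_keys_insert d n 1 hd)

theorem pvAllNodes_perm (g : PySem.Dict Int (List Int))
    (h3 : ∀ u v : Int, v ∈ g.getD u [] → v ∈ g.keys) (h4 : g.keys.Nodup) :
    (pvAllNodes g).Perm g.keys := by
  unfold pvAllNodes
  refine (List.perm_ext_iff_of_nodup (pvAN_nodup g g.keys _ PySem.Dict.nodup_keys_empty) h4).mpr ?_
  intro y
  rw [pvAN_mem]
  simp only [PySem.Dict.keys_empty, List.not_mem_nil, false_or]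
  constructor
  · rintro ⟨node, hn, rfl | hy⟩
    · exact hn
    · exact h3 node y hy
  · intro hy
    exact ⟨y, hy, Or.inl rfl⟩

theorem pvSwapInner_sum (fuel : Nat) (ds : List Int) (si sj : Nat) :
    si < ds.length → si < sj → (pvSwapInner fuel ds si sj).sum = ds.sum := by
  induction fuel generalizing ds sj with
  | zero => intro _ _; rfl
  | succ fuel ih =>
    intro hsi hlt
    rw [pvSwapInner]
    split
    · rename_i h
      have hlen : (if ds.getD sj 0 > ds.getD si 0 then (ds.set si (ds.getD sj 0)).set sj (ds.getD si 0) else ds).length = ds.length := by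
        split <;> simp [List.length_set]
      rw [ih _ _ (by rw [hlen]; exact hsi) (Nat.lt_succ_of_lt hlt)]
      split
      · exact pvSwap_sum ds si sj hsi h (Nat.ne_of_lt hlt)
      · rfl
    · rfl

theorem pvSwapOuter_sum (fuel : Nat) (ds : List Int) (si : Nat) :
    (pvSwapOuter fuel ds si).sum = ds.sum := by
  induction fuel generalizing ds si with
  | zero => rfl
  | succ fuel ih =>
    rw [pvSwapOuter]
    split
    · rename_i h
      rw [ih, pvSwapInner_sum ds.length ds si (si + 1) h (Nat.lt_succ_self si)]
    · rfl

theorem pvMain (graph : List (Int × List Int)) : sum_degrees graph = sum_degrees_alt graph := by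
  have hnodup := PySem.Dict.nodup_keys_ofList (κ := Int) (ν := List Int) graph
  set gd := PySem.Dict.ofList graph with hgd
  set F := gd.items.foldl (fun st p => p.2.foldl (pvNeighborStep p.1) (pvEnsure st p.1))
      ((PySem.Dict.empty : PySem.Dict Int (List Int)), (PySem.Dict.empty : PySem.Dict Int (PySem.Dict Int Int))) with hF
  set S := gd.items.foldl (fun s p => p.2.foldl (fun s v => PySem.Set.add s (pvNorm p.1 v)) s)
      (PySem.Set.empty : PySem.Set (Int × Int)) with hS
  have hInv0 : pvInv PySem.Dict.empty PySem.Dict.empty (PySem.Set.empty : PySem.Set (Int × Int)) := by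
    refine ⟨?_, ?_, ?_, ?_⟩
    · intro u v
      rw [PySem.Dict.getD_empty]
      simp [PySem.Dict.contains_empty, PySem.Set.empty]
    · simp [pvTotal, pvW, PySem.Dict.keys_empty, PySem.Set.empty]
    · intro u v hv
      rw [PySem.Dict.getD_empty] at hv
      cases hv
    · exact PySem.Dict.nodup_keys_empty
  have hInvF := pvOuterFold_inv gd.items (PySem.Dict.empty, PySem.Dict.empty) PySem.Set.empty hInv0
  rw [← hF, ← hS] at hInvF
  obtain ⟨f1, f2, f3, f4⟩ := hInvF
  have hfold : gd.keys.foldl (fun st node => (gd.getD node []).foldl (pvNeighborStep node) (pvEnsure st node))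
      (PySem.Dict.empty, PySem.Dict.empty) = F := by
    rw [hF, PySem.Dict.items_eq_map_keys gd hnodup [], List.foldl_map]
  have hU : pvMakeUndirected graph = F.1 := by
    simp only [pvMakeUndirected]
    rw [← hgd, hfold]
  have hdeg : (pvDegreeSequence graph).sum = pvTotal F.1 := by
    simp only [pvDegreeSequence]
    rw [hU, pvSwapOuter_sum,
      PySem.List.foldl_append_singleton_eq_map
        (fun node => if F.1.contains node = true then ((F.1.getD node []).length : Int) else 0)
        (pvAllNodes F.1) [], List.nil_append]
    have hperm := pvAllNodes_perm F.1 f3 f4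
    have hcongr : (pvAllNodes F.1).map
          (fun node => if F.1.contains node = true then ((F.1.getD node []).length : Int) else 0)
        = (pvAllNodes F.1).map (fun node => ((F.1.getD node []).length : Int)) :=
      List.map_congr_left (fun n hn => by
        rw [if_pos ((PySem.Dict.contains_iff_mem_keys _ _).mpr (hperm.mem_iff.mp hn))])
    rw [hcongr]
    exact (hperm.map _).sum_eq
  have hBside : sum_degrees_alt graph = pvW S := by
    simp only [sum_degrees_alt]
    rw [← hgd, ← hS, PySem.List.foldl_add _ (fun (e : Int × Int) => if e.1 == e.2 then (1:Int) else 2) 0]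
    simp [pvW]
  calc sum_degrees graph = (pvDegreeSequence graph).foldl (fun t d => t + d) 0 := rfl
    _ = 0 + ((pvDegreeSequence graph).map (fun d => d)).sum := PySem.List.foldl_add _ (fun d => d) 0
    _ = (pvDegreeSequence graph).sum := by simp
    _ = pvTotal F.1 := hdeg
    _ = pvW S := f2
    _ = sum_degrees_alt graph := hBside.symm

-- ===== VERDICT (by name: the statement is the Claim_ definition above) =====
theorem sum_degrees_spec : Claim_equal_sum_degrees := by
  intro graph _
  unfold Spec_sum_degrees
  exact pvMain graph
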